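-- pv_equiv track=rewrite | github.com/dustinboswell/daily-coding-problem | prob246.py | try_chain
-- ===== SOURCE A (Python) =====
-- def try_chain(words, starting_letter, ending_letter):
--     if len(words) == 1:
--         word = words[0]
--         return word[0] == starting_letter and word[-1] == ending_letter
--
--     for i in range(len(words)):
--         word = words[i]
--         if word[0] != starting_letter:
--             continue
--
--         unused_words = words[0:i] + words[i+1:]
--         if try_chain(unused_words, word[-1], ending_letter):
--             return True
--
--     return False
-- ===== SOURCE B (Python) =====
-- def _bump(deg, v, delta):
--     deg[v] = deg.get(v, 0) + delta
--
--
-- def _spread(edges, reached):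
--     # one round of undirected label propagation from `reached`
--     new = set(reached)
--     for a, b in edges:
--         if a in reached or b in reached:
--             new.add(a)
--             new.add(b)
--     return new
--
--
-- def try_chain(words, starting_letter, ending_letter):
--     # Eulerian-path existence on the letter graph: each word is an edge
--     # first-letter -> last-letter.  A chain using every word exists iff the
--     # in/out-degrees are balanced for a trail from starting_letter to
--     # ending_letter AND every edge is (undirectedly) connected to
--     # starting_letter.
--     if not words:
--         return False
--     edges = [(w[0], w[-1]) for w in words]
--
--     deg = {}
--     for a, b in edges:
--         _bump(deg, a, 1)
--         _bump(deg, b, -1)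
--     _bump(deg, starting_letter, -1)
--     _bump(deg, ending_letter, 1)
--     if any(d != 0 for d in deg.values()):
--         return False
--
--     verts = {starting_letter}
--     for a, b in edges:
--         verts.add(a)
--         verts.add(b)
--     reached = {starting_letter}
--     for _ in range(len(verts)):
--         reached = _spread(edges, reached)
--     return all(a in reached and b in reached for a, b in edges)
-- ===== Notes on version B (the rewrite author's own statement) =====
-- stated objective: alternative
-- what changed: Replaces A's recursive backtracking search over word orderings by the Eulerian-path existence criterion on the letter graph (each word an edge first-letter->last-letter): degree balance for a trail from start to end plus undirected connectivity of all edges to the start, computed by degree counting and label propagation.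
import Mathlib
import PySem

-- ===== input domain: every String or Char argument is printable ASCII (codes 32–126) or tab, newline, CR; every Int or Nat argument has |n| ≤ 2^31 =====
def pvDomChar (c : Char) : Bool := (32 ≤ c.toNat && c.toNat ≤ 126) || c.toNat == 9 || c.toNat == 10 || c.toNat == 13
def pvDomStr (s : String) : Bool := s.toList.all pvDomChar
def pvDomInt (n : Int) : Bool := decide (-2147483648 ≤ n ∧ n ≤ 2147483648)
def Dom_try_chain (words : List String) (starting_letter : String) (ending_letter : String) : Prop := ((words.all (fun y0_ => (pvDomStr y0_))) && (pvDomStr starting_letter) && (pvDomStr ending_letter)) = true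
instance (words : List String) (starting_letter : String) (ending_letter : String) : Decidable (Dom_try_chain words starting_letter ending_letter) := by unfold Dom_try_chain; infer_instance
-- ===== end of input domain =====

-- B replaces A's backtracking search over word orderings by the Eulerian-path
-- criterion on the letter graph (degree balance + connectivity), proved equivalent here.

-- ===== PORT A =====

-- word[0] / word[-1] as the 1-character Python STRING they denote (none = IndexError)
def pvFirst (w : String) : Option String := (PySem.Str.pyGet? w 0).map (fun c => String.ofList [c])
def pvLast (w : String) : Option String := (PySem.Str.pyGet? w (-1)).map (fun c => String.ofList [c])

-- A's recursion, fuel = words.length at every reachable call (fuel only makes it total)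
def tcAuxA : Nat → List String → String → String → Bool
  | 0, _, _, _ => false
  | fuel+1, words, starting_letter, ending_letter =>
    if words.length == 1 then
      match PySem.List.pyGet? words 0 with
      | none => false
      | some word => (pvFirst word == some starting_letter) && (pvLast word == some ending_letter)
    else
      (PySem.List.pyRange 0 words.length 1).any (fun i =>
        match PySem.List.pyGet? words i with
        | none => false
        | some word =>
          match pvFirst word with
          | none => false
          | some f =>
            if f == starting_letter then
              match pvLast word with
              | none => false
              | some l =>
                tcAuxA fuel
                  (PySem.List.slice words (some 0) (some i) ++ PySem.List.slice words (some (i+1)) none)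
                  l ending_letter
            else false)

def try_chain (words : List String) (starting_letter : String) (ending_letter : String) : Bool :=
  tcAuxA words.length words starting_letter ending_letter

-- ===== PORT B =====

-- the edge list [(w[0], w[-1]) for w in words] (none = IndexError on an empty word)
def edgeListB : List String → Option (List (String × String))
  | [] => some []
  | w :: ws =>
    match pvFirst w, pvLast w with
    | some f, some l => (edgeListB ws).map (fun r => (f, l) :: r)
    | _, _ => none

-- Source B's _bump: deg[v] = deg.get(v, 0) + delta
def degAdd (d : PySem.Dict String Int) (v : String) (delta : Int) : PySem.Dict String Int :=
  d.insert v (d.getD v 0 + delta)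

-- Source B's _spread: one round of undirected label propagation
def connRound (edges : List (String × String)) (r : PySem.Set String) : PySem.Set String :=
  edges.foldl
    (fun nw p =>
      if r.contains p.1 || r.contains p.2 then PySem.Set.add (PySem.Set.add nw p.1) p.2 else nw)
    r

def try_chain_alt (words : List String) (starting_letter : String) (ending_letter : String) : Bool :=
  if words.isEmpty then false
  else
    match edgeListB words with
    | none => false  -- Python raises IndexError here; excluded by Pre_
    | some edges =>
      let deg := edges.foldl (fun d p => degAdd (degAdd d p.1 1) p.2 (-1)) PySem.Dict.empty
      let deg := degAdd (degAdd deg starting_letter (-1)) ending_letter 1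
      if deg.values.any (fun x => x != 0) then false
      else
        let verts := edges.foldl (fun v p => PySem.Set.add (PySem.Set.add v p.1) p.2)
          (PySem.Set.ofList [starting_letter])
        let reached := (List.range verts.length).foldl (fun r _ => connRound edges r)
          (PySem.Set.ofList [starting_letter])
        edges.all (fun p => reached.contains p.1 && reached.contains p.2)

-- ===== PRECONDITION & SPEC =====
-- Pre_ excludes lists containing the empty word "": there Python A evaluates word[0] and
-- raises IndexError (B raises too); everything else A accepts is admitted.
def Pre_try_chain (words : List String) (starting_letter : String) (ending_letter : String) : Prop :=
  ¬ ("" ∈ words)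
instance (words : List String) (starting_letter : String) (ending_letter : String) : Decidable (Pre_try_chain words starting_letter ending_letter) := by unfold Pre_try_chain; infer_instance

def pvWitness_try_chain : List String × String × String := (["ab", "bc"], "a", "c")

def Spec_try_chain (words : List String) (starting_letter : String) (ending_letter : String) (out : Bool) : Prop := out = try_chain_alt words starting_letter ending_letter
instance (words : List String) (starting_letter : String) (ending_letter : String) (out : Bool) : Decidable (Spec_try_chain words starting_letter ending_letter out) := by unfold Spec_try_chain; infer_instance

-- ===== CLAIM (what is proved, stated in full; the proofs are below) =====
def Claim_equal_try_chain : Prop := ∀ (words : List String) (starting_letter : String) (ending_letter : String), Dom_try_chain words starting_letter ending_letter → Pre_try_chain words starting_letter ending_letter → Spec_try_chain words starting_letter ending_letter (try_chain words starting_letter ending_letter)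

-- ===== LEMMAS AND PROOFS =====

-- ---------- A's search decides the chain predicate Ch ----------

-- 'a chain consuming all of ws, starting at cur, ending at e, exists'
inductive Ch (e : String) : List String → String → Prop
  | nil : Ch e [] e
  | step {ws : List String} {cur w l : String} (hw : w ∈ ws) (hf : pvFirst w = some cur)
      (hl : pvLast w = some l) (hc : Ch e (ws.erase w) l) : Ch e ws cur

theorem ch_nil_iff (e cur : String) : Ch e [] cur ↔ cur = e := by
  constructor
  · intro h; cases h with
    | nil => rfl
    | step hw _ _ _ => cases hw
  · rintro rfl; exact Ch.nil

theorem ch_perm {e : String} {ws ws' : List String} {cur : String}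
    (h : Ch e ws cur) (hp : ws.Perm ws') : Ch e ws' cur := by
  induction h generalizing ws' with
  | nil => rw [← hp.nil_eq]; exact Ch.nil
  | step hw hf hl _ ih =>
    exact Ch.step (hp.mem_iff.mp hw) hf hl (ih (hp.erase _))

theorem perm_cons_eraseIdx {α : Type} : ∀ (l : List α) (i : Nat) (a : α),
    l[i]? = some a → l.Perm (a :: l.eraseIdx i)
  | [], i, a, h => by simp at h
  | b :: t, 0, a, h => by
    simp at h; subst h; simp
  | b :: t, i+1, a, h => by
    simp at h
    have := perm_cons_eraseIdx t i a h
    show (b :: t).Perm (a :: b :: t.eraseIdx i)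
    exact (this.cons b).trans (List.Perm.swap a b _)

theorem eraseIdx_perm_erase {l : List String} {i : Nat} {a : String}
    (h : l[i]? = some a) : (l.eraseIdx i).Perm (l.erase a) := by
  have h1 := perm_cons_eraseIdx l i a h
  have h2 := List.perm_cons_erase (l := l) (a := a)
    (List.mem_of_getElem? h)
  exact (h2.symm.trans h1).cons_inv.symm

theorem ch_inv {e : String} {ws : List String} {cur : String} (h : Ch e ws cur) (hne : ws ≠ []) :
    ∃ w l, w ∈ ws ∧ pvFirst w = some cur ∧ pvLast w = some l ∧ Ch e (ws.erase w) l := by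
  cases h with
  | nil => exact absurd rfl hne
  | step hw hf hl hc => exact ⟨_, _, hw, hf, hl, hc⟩

theorem tcAuxA_succ (fuel : Nat) (words : List String) (starting_letter ending_letter : String) :
    tcAuxA (fuel+1) words starting_letter ending_letter =
      (if words.length == 1 then
        match PySem.List.pyGet? words 0 with
        | none => false
        | some word => (pvFirst word == some starting_letter) && (pvLast word == some ending_letter)
      else
        (PySem.List.pyRange 0 words.length 1).any (fun i =>
          match PySem.List.pyGet? words i with
          | none => false
          | some word =>
            match pvFirst word with
            | none => false
            | some f =>
              if f == starting_letter then
                match pvLast word with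
                | none => false
                | some l =>
                  tcAuxA fuel
                    (PySem.List.slice words (some 0) (some i) ++ PySem.List.slice words (some (i+1)) none)
                    l ending_letter
              else false)) := rfl

-- A's search decides Ch
theorem tcAuxA_iff_ch (e : String) : ∀ (n : Nat) (ws : List String) (cur : String),
    ws.length = n → ws ≠ [] → (tcAuxA n ws cur e = true ↔ Ch e ws cur) := by
  intro n
  induction n with
  | zero =>
    intro ws cur hlen hne
    exact absurd (List.length_eq_zero_iff.mp hlen) hne
  | succ n ih =>
    intro ws cur hlen hne
    cases n with
    | zero =>
      obtain ⟨w, rfl⟩ := List.length_eq_one_iff.mp hlen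
      rw [tcAuxA_succ]
      simp only [List.length_cons, List.length_nil, PySem.List.pyGet?_zero_cons,
        Nat.zero_add, beq_self_eq_true, if_true, Bool.and_eq_true, beq_iff_eq]
      constructor
      · rintro ⟨hf, hl⟩
        exact Ch.step (List.mem_cons_self) hf hl (by simp [List.erase_cons_head]; exact Ch.nil)
      · intro h
        obtain ⟨w', l, hw, hf, hl, hc⟩ := ch_inv h (by simp)
        rw [List.mem_singleton] at hw; subst hw
        rw [List.erase_cons_head, ch_nil_iff] at hc
        subst hc
        exact ⟨hf, hl⟩
    | succ m =>
      have hcond : (ws.length == 1) = false := by simp [hlen]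
      rw [tcAuxA_succ, hcond]
      simp only [Bool.false_eq_true, if_false, List.any_eq_true]
      constructor
      · rintro ⟨i, hi, hbody⟩
        rw [PySem.List.mem_pyRange_one] at hi
        obtain ⟨hi0, hilt⟩ := hi
        have hik : i = ((i.toNat : Nat) : Int) := (Int.toNat_of_nonneg hi0).symm
        set k := i.toNat with hk
        have hklt : k < ws.length := by omega
        rw [hik, PySem.List.pyGet?_natCast, List.getElem?_eq_getElem hklt] at hbody
        simp only at hbody
        rcases hf : pvFirst ws[k] with _ | f
        · rw [hf] at hbody; exact absurd hbody (by simp)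
        rw [hf] at hbody
        simp only at hbody
        by_cases hfc : f = cur
        · rw [if_pos (by simp [hfc])] at hbody
          rcases hl : pvLast ws[k] with _ | l
          · rw [hl] at hbody; exact absurd hbody (by simp)
          rw [hl] at hbody
          simp only at hbody
          have hsl : PySem.List.slice ws (some 0) (some (k : Int)) ++ PySem.List.slice ws (some ((k:Int)+1)) none
              = ws.eraseIdx k := by
            rw [PySem.List.slice_zero_start]
            have : ((k : Int) + 1) = ((k + 1 : Nat) : Int) := by push_cast; ring
            rw [this, PySem.List.slice_to_natCast, PySem.List.slice_from_natCast,
              List.eraseIdx_eq_take_drop_succ]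
          rw [hsl] at hbody
          have hlen' : (ws.eraseIdx k).length = m + 1 := by
            rw [List.length_eraseIdx_of_lt hklt]; omega
          have hne' : ws.eraseIdx k ≠ [] := by
            intro hcon; rw [hcon] at hlen'; simp at hlen'
          have hch := (ih _ _ hlen' hne').mp hbody
          have hget : ws[k]? = some ws[k] := List.getElem?_eq_getElem hklt
          refine Ch.step (List.getElem_mem hklt) (by rw [hf, hfc]) hl ?_
          exact ch_perm hch (eraseIdx_perm_erase hget)
        · rw [if_neg (by simp [hfc])] at hbody
          exact absurd hbody (by simp)
      · intro h
        obtain ⟨w, l, hw, hf, hl, hc⟩ := ch_inv h hne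
        have hklt : ws.idxOf w < ws.length := List.idxOf_lt_length_of_mem hw
        set k := ws.idxOf w with hk
        refine ⟨(k : Int), ?_, ?_⟩
        · rw [PySem.List.mem_pyRange_one]
          constructor
          · exact Int.natCast_nonneg k
          · exact_mod_cast hklt
        · rw [PySem.List.pyGet?_natCast, List.getElem?_eq_getElem hklt]
          simp only
          have hgw : ws[k] = w := List.getElem_idxOf hklt
          rw [hgw, hf]
          simp only [BEq.rfl, if_true]
          rw [hl]
          have hsl : PySem.List.slice ws (some 0) (some (k : Int)) ++ PySem.List.slice ws (some ((k:Int)+1)) none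
              = ws.eraseIdx k := by
            rw [PySem.List.slice_zero_start]
            have : ((k : Int) + 1) = ((k + 1 : Nat) : Int) := by push_cast; ring
            rw [this, PySem.List.slice_to_natCast, PySem.List.slice_from_natCast,
              List.eraseIdx_eq_take_drop_succ]
          rw [hsl]
          have hlen' : (ws.eraseIdx k).length = m + 1 := by
            rw [List.length_eraseIdx_of_lt hklt]; omega
          have hne' : ws.eraseIdx k ≠ [] := by
            intro hcon; rw [hcon] at hlen'; simp at hlen'
          refine (ih _ _ hlen' hne').mpr ?_
          have hget : ws[k]? = some w := by rw [List.getElem?_eq_getElem hklt, hgw]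
          exact ch_perm hc (eraseIdx_perm_erase hget).symm

-- ---------- directed multigraph trails over edge lists ----------

-- out- and in-degree of v in the edge multiset E
def outC (E : List (String × String)) (v : String) : Nat := E.countP (fun p => p.1 == v)
def innC (E : List (String × String)) (v : String) : Nat := E.countP (fun p => p.2 == v)

def Bal (E : List (String × String)) (s t : String) : Prop :=
  ∀ v, outC E v + (if v = t then 1 else 0) = innC E v + (if v = s then 1 else 0)

def Adj (E : List (String × String)) (a b : String) : Prop := (a, b) ∈ E ∨ (b, a) ∈ E

def Reach (E : List (String × String)) (a b : String) : Prop := Relation.ReflTransGen (Adj E) a b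

def Conn (E : List (String × String)) (s : String) : Prop := ∀ p ∈ E, Reach E s p.1

-- endpoints of E
def epts (E : List (String × String)) : List String := E.flatMap (fun p => [p.1, p.2])

theorem mem_epts {E : List (String × String)} {v : String} :
    v ∈ epts E ↔ ∃ p ∈ E, v = p.1 ∨ v = p.2 := by
  simp [epts]

-- 'a trail consuming all edges of E from a to t exists'
inductive Eu (t : String) : List (String × String) → String → Prop
  | nil : Eu t [] t
  | step {E : List (String × String)} {a b : String} (h : (a, b) ∈ E)
      (hc : Eu t (E.erase (a, b)) b) : Eu t E a

theorem eu_perm {t : String} {E E' : List (String × String)} {a : String}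
    (h : Eu t E a) (hp : E.Perm E') : Eu t E' a := by
  induction h generalizing E' with
  | nil => rw [← hp.nil_eq]; exact Eu.nil
  | step hm _ ih => exact Eu.step (hp.mem_iff.mp hm) (ih (hp.erase _))

theorem eu_inv {t : String} {E : List (String × String)} {a : String} (h : Eu t E a) :
    (E = [] ∧ a = t) ∨ ∃ b, (a, b) ∈ E ∧ Eu t (E.erase (a, b)) b := by
  cases h with
  | nil => exact Or.inl ⟨rfl, rfl⟩
  | step hm hc => exact Or.inr ⟨_, hm, hc⟩

theorem outC_erase {E : List (String × String)} {a b : String} (v : String) (hp : (a, b) ∈ E) :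
    outC E v = (if v = a then 1 else 0) + outC (E.erase (a, b)) v := by
  have h := (List.perm_cons_erase hp).countP_eq (fun q => q.1 == v)
  unfold outC
  rw [h, List.countP_cons]
  by_cases hv : v = a
  · subst hv; simp; omega
  · simp [hv, Ne.symm hv]

theorem innC_erase {E : List (String × String)} {a b : String} (v : String) (hp : (a, b) ∈ E) :
    innC E v = (if v = b then 1 else 0) + innC (E.erase (a, b)) v := by
  have h := (List.perm_cons_erase hp).countP_eq (fun q => q.2 == v)
  unfold innC
  rw [h, List.countP_cons]
  by_cases hv : v = b
  · subst hv; simp; omega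
  · simp [hv, Ne.symm hv]

theorem eu_bal {t : String} {E : List (String × String)} {s : String} (h : Eu t E s) :
    Bal E s t := by
  induction h with
  | nil => intro v; simp [outC, innC]
  | @step E a b hm hc ih =>
    intro v
    have ho := outC_erase v hm
    have hi := innC_erase v hm
    have hb := ih v
    split_ifs at ho hi hb ⊢ <;> omega

theorem reach_mono {E E' : List (String × String)} {a b : String}
    (hsub : ∀ q, q ∈ E' → q ∈ E) (h : Reach E' a b) : Reach E a b :=
  Relation.ReflTransGen.mono (fun _ _ hxy => hxy.imp (hsub _) (hsub _)) h

theorem reach_snd {E : List (String × String)} {s : String} {p : String × String}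
    (hp : p ∈ E) (h : Reach E s p.1) : Reach E s p.2 :=
  h.tail (show Adj E p.1 p.2 from Or.inl (by rcases p with ⟨a, b⟩; exact hp))

theorem eu_conn {t : String} {E : List (String × String)} {s : String} (h : Eu t E s) :
    Conn E s := by
  induction h with
  | nil => intro p hp; cases hp
  | @step E a b hm hc ih =>
    intro p hp
    by_cases hpe : p = (a, b)
    · subst hpe; exact Relation.ReflTransGen.refl
    · have hp' : p ∈ E.erase (a, b) := (List.mem_erase_of_ne hpe).mpr hp
      have h1 : Reach E b p.1 := reach_mono (fun q hq => List.mem_of_mem_erase hq) (ih p hp')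
      exact Relation.ReflTransGen.trans
        (Relation.ReflTransGen.single (show Adj E a b from Or.inl hm)) h1

theorem eu_compose {t m : String} {D C : List (String × String)} {c : String}
    (h1 : Eu m D c) (h2 : Eu t C m) : Eu t (D ++ C) c := by
  induction h1 with
  | nil => simpa using h2
  | @step E a b hm hc ih =>
    exact Eu.step (List.mem_append_left _ hm)
      (by rw [List.erase_append_left _ hm]; exact ih)

theorem eu_splice {t : String} {C : List (String × String)} {s v : String}
    {D : List (String × String)} (h : Eu t C s) (hD : Eu v D v)
    (hv : v = s ∨ v ∈ epts C) : Eu t (C ++ D) s := by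
  induction h with
  | nil =>
    rcases hv with rfl | hv
    · simpa using hD
    · simp [epts] at hv
  | @step E a b hm hc ih =>
    by_cases hva : v = a
    · subst hva
      exact eu_perm (eu_compose hD (Eu.step hm hc)) List.perm_append_comm
    · have hv' : v = b ∨ v ∈ epts (E.erase (a, b)) := by
        rcases hv with rfl | hv
        · exact absurd rfl hva
        · obtain ⟨p, hp, hvp⟩ := mem_epts.mp hv
          by_cases hpe : p = (a, b)
          · subst hpe
            rcases hvp with h1 | h1
            · exact absurd h1 hva
            · exact Or.inl h1
          · exact Or.inr (mem_epts.mpr ⟨p, (List.mem_erase_of_ne hpe).mpr hp, hvp⟩)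
      exact Eu.step (List.mem_append_left _ hm)
        (by rw [List.erase_append_left _ hm]; exact ih hv')

-- balance bookkeeping when one edge (c, b) is removed
theorem bal_erase {E : List (String × String)} {c b send : String} (hp : (c, b) ∈ E)
    (hbal : ∀ v, outC E v + (if v = send then 1 else 0) = innC E v + (if v = c then 1 else 0)) :
    ∀ v, outC (E.erase (c, b)) v + (if v = send then 1 else 0)
        = innC (E.erase (c, b)) v + (if v = b then 1 else 0) := by
  intro v
  have ho := outC_erase v hp
  have hi := innC_erase v hp
  have hb := hbal v
  split_ifs at ho hi hb ⊢ <;> omega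

-- greedy walk: a (c → send)-deficit edge multiset contains a trail from c to send
theorem gwalk (send : String) : ∀ (n : Nat) (E : List (String × String)) (c : String),
    E.length ≤ n →
    (∀ v, outC E v + (if v = send then 1 else 0) = innC E v + (if v = c then 1 else 0)) →
    ∃ C, C.Subperm E ∧ Eu send C c := by
  intro n
  induction n with
  | zero =>
    intro E c hlen hbal
    have hE : E = [] := List.length_eq_zero_iff.mp (Nat.le_zero.mp hlen)
    subst hE
    have hb := hbal c
    simp [outC, innC] at hb
    subst hb
    exact ⟨[], List.nil_subperm, Eu.nil⟩
  | succ n ih =>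
    intro E c hlen hbal
    by_cases hcs : c = send
    · exact ⟨[], List.nil_subperm, hcs ▸ Eu.nil⟩
    · have h1 : 0 < outC E c := by
        have hb := hbal c
        rw [if_neg hcs, if_pos rfl] at hb
        omega
      obtain ⟨p, hp, hpc⟩ := List.countP_pos_iff.mp h1
      obtain ⟨a, b⟩ := p
      have hac : a = c := by simpa using hpc
      subst hac
      have hlen' : (E.erase (a, b)).length ≤ n := by
        have := List.length_erase_of_mem hp; omega
      obtain ⟨C', hsub, heu⟩ := ih (E.erase (a, b)) b hlen' (bal_erase hp hbal)
      refine ⟨(a, b) :: C', ?_, ?_⟩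
      · exact ((List.subperm_cons _).mpr hsub).trans (List.perm_cons_erase hp).symm.subperm
      · exact Eu.step List.mem_cons_self (by rw [List.erase_cons_head]; exact heu)

-- grow a partial trail to cover all of E by splicing in closed trails
theorem grow (E : List (String × String)) (s t : String) (hbal : Bal E s t) (hconn : Conn E s) :
    ∀ (n : Nat) (C : List (String × String)), E.length - C.length ≤ n →
    C.Subperm E → Eu t C s → Eu t E s := by
  intro n
  induction n with
  | zero =>
    intro C hle hsub hC
    exact eu_perm hC (hsub.perm_of_length_le (by omega))
  | succ n ih =>
    intro C hle hsub hC
    obtain ⟨C', hCp, hsl⟩ := hsub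
    obtain ⟨R, hperm⟩ := hsl.exists_perm_append
    have hER : E.Perm (C ++ R) := hperm.trans (hCp.append_right R)
    have hsub : C.Subperm E := ⟨C', hCp, hsl⟩
    by_cases hRnil : R = []
    · subst hRnil
      exact eu_perm hC (by simpa using hER.symm)
    · have hcount : ∀ q, List.count q E = List.count q C + List.count q R := by
        intro q; rw [hER.count_eq, List.count_append]
      have hoE : ∀ v, outC E v = outC C v + outC R v := by
        intro v; unfold outC; rw [hER.countP_eq, List.countP_append]
      have hiE : ∀ v, innC E v = innC C v + innC R v := by
        intro v; unfold innC; rw [hER.countP_eq, List.countP_append]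
      have hRbal : ∀ v, outC R v = innC R v := by
        intro v
        have h1 := hbal v
        have h2 := eu_bal hC v
        rw [hoE, hiE] at h1
        split_ifs at h1 h2 <;> omega
      have hRE : ∀ q, q ∈ R → q ∈ E := by
        intro q hq; exact hER.mem_iff.mpr (List.mem_append_right _ hq)
      have hfind : ∃ v, (v = s ∨ v ∈ epts C) ∧ ∃ q ∈ R, v = q.1 ∨ v = q.2 := by
        by_contra hno
        push_neg at hno
        have hcl : ∀ x, Reach E s x → (x = s ∨ x ∈ epts C) := by
          intro x hx
          induction hx with
          | refl => exact Or.inl rfl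
          | @tail y z hsy hyz ihy =>
            rcases hyz with hq | hq
            · rcases (by
                  have hcp : 0 < List.count (y, z) E := List.count_pos_iff.mpr hq
                  rw [hcount] at hcp
                  rcases Nat.lt_or_ge 0 (List.count (y, z) C) with h | h
                  · exact Or.inl (List.count_pos_iff.mp h)
                  · exact Or.inr (List.count_pos_iff.mp (by omega)) :
                  (y, z) ∈ C ∨ (y, z) ∈ R) with hqC | hqR
              · exact Or.inr (mem_epts.mpr ⟨(y, z), hqC, Or.inr rfl⟩)
              · exact absurd rfl (hno y ihy (y, z) hqR).1
            · rcases (by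
                  have hcp : 0 < List.count (z, y) E := List.count_pos_iff.mpr hq
                  rw [hcount] at hcp
                  rcases Nat.lt_or_ge 0 (List.count (z, y) C) with h | h
                  · exact Or.inl (List.count_pos_iff.mp h)
                  · exact Or.inr (List.count_pos_iff.mp (by omega)) :
                  (z, y) ∈ C ∨ (z, y) ∈ R) with hqC | hqR
              · exact Or.inr (mem_epts.mpr ⟨(z, y), hqC, Or.inl rfl⟩)
              · exact absurd rfl (hno y ihy (z, y) hqR).2
        obtain ⟨r, hr⟩ := List.exists_mem_of_ne_nil R hRnil
        have hreach : Reach E s r.1 := hconn r (hRE r hr)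
        exact absurd rfl (hno r.1 (hcl _ hreach) r hr).1
      obtain ⟨v, hvC, q, hqR, hvq⟩ := hfind
      have hvout : 0 < outC R v := by
        rcases hvq with h1 | h1
        · exact List.countP_pos_iff.mpr ⟨q, hqR, by simp [h1]⟩
        · rw [hRbal]
          exact List.countP_pos_iff.mpr ⟨q, hqR, by simp [h1]⟩
      obtain ⟨p, hpR, hp1⟩ := List.countP_pos_iff.mp hvout
      obtain ⟨a, b⟩ := p
      have hav : a = v := by simpa using hp1
      subst hav
      have hbal' : ∀ u, outC (R.erase (a, b)) u + (if u = a then 1 else 0)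
          = innC (R.erase (a, b)) u + (if u = b then 1 else 0) :=
        bal_erase hpR (fun u => by rw [hRbal])
      obtain ⟨D', hD'sub, hD'⟩ := gwalk a (R.erase (a, b)).length (R.erase (a, b)) b le_rfl hbal'
      have hDeu : Eu a ((a, b) :: D') a :=
        Eu.step List.mem_cons_self (by rw [List.erase_cons_head]; exact hD')
      have hDsub : ((a, b) :: D').Subperm R :=
        ((List.subperm_cons _).mpr hD'sub).trans (List.perm_cons_erase hpR).symm.subperm
      have hC2 : Eu t (C ++ ((a, b) :: D')) s := eu_splice hC hDeu hvC
      have hsub2 : (C ++ ((a, b) :: D')).Subperm E := by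
        rw [List.subperm_ext_iff]
        intro x hx
        have h1 := hDsub.count_le x
        rw [hcount, List.count_append]
        omega
      have hlen2 : E.length - (C ++ ((a, b) :: D')).length ≤ n := by
        have h1 := hsub2.length_le
        simp only [List.length_append, List.length_cons] at h1 ⊢
        omega
      exact ih _ hlen2 hsub2 hC2

-- Euler's theorem for directed multigraph trails
theorem euler_iff (E : List (String × String)) (s t : String) :
    Eu t E s ↔ (Bal E s t ∧ Conn E s) := by
  constructor
  · exact fun h => ⟨eu_bal h, eu_conn h⟩
  · rintro ⟨hb, hc⟩
    obtain ⟨C, hsub, hC⟩ := gwalk t E.length E s le_rfl hb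
    exact grow E s t hb hc E.length C (by omega) hsub hC

-- ---------- words ↔ edges ----------

def edgeT (w : String) : String × String := ((pvFirst w).getD "", (pvLast w).getD "")

theorem pvFirst_of_ne {w : String} (h : w ≠ "") : pvFirst w = some (edgeT w).1 := by
  have hl : w.toList ≠ [] := fun hc => h (String.toList_eq_nil_iff.mp hc)
  cases hlist : w.toList with
  | nil => exact absurd hlist hl
  | cons c cs => simp [pvFirst, edgeT, hlist, pysem]

theorem pvLast_of_ne {w : String} (h : w ≠ "") : pvLast w = some (edgeT w).2 := by
  have hl : w.toList ≠ [] := fun hc => h (String.toList_eq_nil_iff.mp hc)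
  obtain ⟨ys, y, hys⟩ := List.eq_nil_or_concat w.toList |>.resolve_left hl
  simp [pvLast, edgeT, hys, pysem]

theorem edgeListB_eq {ws : List String} (h : ∀ w ∈ ws, w ≠ "") :
    edgeListB ws = some (ws.map edgeT) := by
  induction ws with
  | nil => rfl
  | cons w ws ih =>
    have hw := h w List.mem_cons_self
    rw [edgeListB, pvFirst_of_ne hw, pvLast_of_ne hw,
      ih (fun x hx => h x (List.mem_cons_of_mem _ hx))]
    rfl

theorem map_edgeT_erase_perm {ws : List String} {w : String} (hw : w ∈ ws) :
    ((ws.map edgeT).erase (edgeT w)).Perm ((ws.erase w).map edgeT) := by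
  have h1 : (ws.map edgeT).Perm (edgeT w :: (ws.erase w).map edgeT) := by
    have := (List.perm_cons_erase hw).map edgeT
    simpa using this
  have h2 := h1.erase (edgeT w)
  rwa [List.erase_cons_head] at h2

theorem ch_iff_eu (e : String) : ∀ (n : Nat) (ws : List String) (cur : String),
    ws.length ≤ n → (∀ w ∈ ws, w ≠ "") →
    (Ch e ws cur ↔ Eu e (ws.map edgeT) cur) := by
  intro n
  induction n with
  | zero =>
    intro ws cur hlen hne
    have hnil : ws = [] := List.length_eq_zero_iff.mp (Nat.le_zero.mp hlen)
    subst hnil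
    simp only [List.map_nil, ch_nil_iff]
    constructor
    · rintro rfl; exact Eu.nil
    · intro h
      rcases eu_inv h with ⟨_, rfl⟩ | ⟨b, hm, _⟩
      · rfl
      · cases hm
  | succ n ih =>
    intro ws cur hlen hne
    constructor
    · intro h
      cases h with
      | nil => exact Eu.nil
      | @step _ _ w l hw hf hl hc =>
        have hwne := hne w hw
        have hfe : (edgeT w).1 = cur := by
          rw [pvFirst_of_ne hwne] at hf; exact Option.some_injective _ hf
        have hle : (edgeT w).2 = l := by
          rw [pvLast_of_ne hwne] at hl; exact Option.some_injective _ hl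
        have hlen' : (ws.erase w).length ≤ n := by
          have := List.length_erase_of_mem hw; omega
        have hne' : ∀ x ∈ ws.erase w, x ≠ "" := fun x hx => hne x (List.mem_of_mem_erase hx)
        have heu := (ih _ _ hlen' hne').mp hc
        refine Eu.step (a := cur) (b := l) ?_ ?_
        · have hmm : edgeT w ∈ ws.map edgeT := List.mem_map_of_mem hw
          rwa [show edgeT w = (cur, l) by rw [← hfe, ← hle]] at hmm
        · refine eu_perm heu ?_
          have hpm := map_edgeT_erase_perm hw
          rw [show edgeT w = (cur, l) by rw [← hfe, ← hle]] at hpm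
          exact hpm.symm
    · intro h
      rcases eu_inv h with ⟨hE, rfl⟩ | ⟨b, hm, hc⟩
      · have : ws = [] := List.map_eq_nil_iff.mp hE
        subst this
        exact Ch.nil
      · obtain ⟨w, hw, hwe⟩ := List.mem_map.mp hm
        have hwne := hne w hw
        have hlen' : (ws.erase w).length ≤ n := by
          have := List.length_erase_of_mem hw; omega
        have hne' : ∀ x ∈ ws.erase w, x ≠ "" := fun x hx => hne x (List.mem_of_mem_erase hx)
        refine Ch.step (l := b) hw ?_ ?_ ((ih (ws.erase w) b hlen' hne').mpr ?_)
        · simp [pvFirst_of_ne hwne, hwe]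
        · simp [pvLast_of_ne hwne, hwe]
        · refine eu_perm hc ?_
          have hpm := map_edgeT_erase_perm hw
          rwa [hwe] at hpm

-- ---------- B's degree check decides Bal ----------

theorem getD_degAdd (d : PySem.Dict String Int) (v : String) (delta : Int) (u : String) :
    (degAdd d v delta).getD u 0 = d.getD u 0 + (if u = v then delta else 0) := by
  unfold degAdd
  rw [PySem.Dict.getD_insert]
  by_cases h : u = v <;> simp [h]

theorem nodup_keys_degAdd {d : PySem.Dict String Int} (h : d.keys.Nodup) (v : String)
    (delta : Int) : (degAdd d v delta).keys.Nodup :=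
  PySem.Dict.nodup_keys_insert _ _ _ h

theorem degFold_getD (l : List (String × String)) :
    ∀ (d : PySem.Dict String Int) (u : String),
    (l.foldl (fun d p => degAdd (degAdd d p.1 1) p.2 (-1)) d).getD u 0
      = d.getD u 0 + (outC l u : Int) - (innC l u : Int) := by
  induction l with
  | nil => intro d u; simp [outC, innC]
  | cons p l ih =>
    intro d u
    rw [List.foldl_cons, ih, getD_degAdd, getD_degAdd]
    unfold outC innC
    rw [List.countP_cons, List.countP_cons]
    by_cases h1 : u = p.1 <;> by_cases h2 : u = p.2
    · rw [if_pos h1, if_pos h2, if_pos (show (p.1 == u) = true by simp [h1]),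
        if_pos (show (p.2 == u) = true by simp [h2])]
      push_cast; ring
    · rw [if_pos h1, if_neg h2, if_pos (show (p.1 == u) = true by simp [h1]),
        if_neg (show ¬ (p.2 == u) = true by simp only [beq_iff_eq]; exact fun hh => h2 hh.symm)]
      push_cast; ring
    · rw [if_neg h1, if_pos h2,
        if_neg (show ¬ (p.1 == u) = true by simp only [beq_iff_eq]; exact fun hh => h1 hh.symm),
        if_pos (show (p.2 == u) = true by simp [h2])]
      push_cast; ring
    · rw [if_neg h1, if_neg h2,
        if_neg (show ¬ (p.1 == u) = true by simp only [beq_iff_eq]; exact fun hh => h1 hh.symm),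
        if_neg (show ¬ (p.2 == u) = true by simp only [beq_iff_eq]; exact fun hh => h2 hh.symm)]
      push_cast; ring

theorem degFold_nodup (l : List (String × String)) :
    ∀ (d : PySem.Dict String Int), d.keys.Nodup →
    ((l.foldl (fun d p => degAdd (degAdd d p.1 1) p.2 (-1)) d)).keys.Nodup := by
  induction l with
  | nil => intro d h; exact h
  | cons p l ih =>
    intro d h
    exact ih _ (nodup_keys_degAdd (nodup_keys_degAdd h _ _) _ _)

-- the final degree dict of B
def degD (E : List (String × String)) (s e : String) : PySem.Dict String Int :=
  degAdd (degAdd (E.foldl (fun d p => degAdd (degAdd d p.1 1) p.2 (-1)) PySem.Dict.empty) s (-1)) e 1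

theorem degD_getD (E : List (String × String)) (s e u : String) :
    (degD E s e).getD u 0 = (outC E u : Int) - (innC E u : Int)
      - (if u = s then 1 else 0) + (if u = e then 1 else 0) := by
  unfold degD
  rw [getD_degAdd, getD_degAdd, degFold_getD, PySem.Dict.getD_empty]
  split_ifs <;> ring

theorem degD_nodup (E : List (String × String)) (s e : String) : (degD E s e).keys.Nodup :=
  nodup_keys_degAdd (nodup_keys_degAdd (degFold_nodup E _ PySem.Dict.nodup_keys_empty) _ _) _ _

theorem degD_check_iff (E : List (String × String)) (s e : String) :
    ((degD E s e).values.any (fun x => x != 0) = false) ↔ Bal E s e := by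
  have hnd := degD_nodup E s e
  have hzero : ((degD E s e).values.any (fun x => x != 0) = false) ↔
      ∀ u, (degD E s e).getD u 0 = 0 := by
    rw [List.any_eq_false]
    constructor
    · intro hall u
      by_cases hu : u ∈ (degD E s e).keys
      · simp only [PySem.Dict.keys] at hu
        obtain ⟨⟨k, x⟩, hp, hk⟩ := List.mem_map.mp hu
        simp only at hk
        subst hk
        have hval : x ∈ (degD E s e).values := by
          simp only [PySem.Dict.values]
          exact List.mem_map.mpr ⟨(k, x), hp, rfl⟩
        have hx : x = 0 := by simpa using hall x hval
        rw [PySem.Dict.getD_of_mem_items _ hp hnd 0, hx]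
      · rw [PySem.Dict.getD_of_not_contains _ 0
          (by rw [PySem.Dict.contains_eq_decide_mem_keys]; simpa using hu)]
    · intro hall x hx
      simp only [PySem.Dict.values] at hx
      obtain ⟨⟨k, y⟩, hp, hy⟩ := List.mem_map.mp hx
      simp only at hy
      subst hy
      have h := hall k
      rw [PySem.Dict.getD_of_mem_items _ hp hnd 0] at h
      simp [h]
  rw [hzero]
  unfold Bal
  constructor
  · intro h v
    have hv := h v
    rw [degD_getD] at hv
    split_ifs at hv ⊢ <;> omega
  · intro h u
    have hu := h u
    rw [degD_getD]
    split_ifs at hu ⊢ <;> omega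

-- ---------- B's propagation decides Conn ----------

theorem mem_connRound {E : List (String × String)} {r : PySem.Set String} {u : String} :
    u ∈ connRound E r ↔ u ∈ r ∨ ∃ p ∈ E, (p.1 ∈ r ∨ p.2 ∈ r) ∧ (u = p.1 ∨ u = p.2) := by
  unfold connRound
  suffices h : ∀ (l : List (String × String)) (nw : PySem.Set String),
      u ∈ l.foldl (fun nw p =>
        if r.contains p.1 || r.contains p.2 then PySem.Set.add (PySem.Set.add nw p.1) p.2 else nw) nw
      ↔ u ∈ nw ∨ ∃ p ∈ l, (p.1 ∈ r ∨ p.2 ∈ r) ∧ (u = p.1 ∨ u = p.2) from h E r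
  intro l
  induction l with
  | nil => intro nw; simp
  | cons q l ih =>
    intro nw
    rw [List.foldl_cons]
    by_cases hcond : (q.1 ∈ r ∨ q.2 ∈ r)
    · rw [if_pos (by
        rw [Bool.or_eq_true, PySem.Set.contains_iff, PySem.Set.contains_iff]; exact hcond)]
      rw [ih]
      simp only [PySem.Set.mem_add, List.mem_cons]
      constructor
      · rintro (((h | h) | h) | ⟨p, hp, hc, he⟩)
        · exact Or.inl h
        · exact Or.inr ⟨q, Or.inl rfl, hcond, Or.inl h⟩
        · exact Or.inr ⟨q, Or.inl rfl, hcond, Or.inr h⟩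
        · exact Or.inr ⟨p, Or.inr hp, hc, he⟩
      · rintro (h | ⟨p, (rfl | hp), hc, he⟩)
        · exact Or.inl (Or.inl (Or.inl h))
        · rcases he with rfl | rfl
          · exact Or.inl (Or.inl (Or.inr rfl))
          · exact Or.inl (Or.inr rfl)
        · exact Or.inr ⟨p, hp, hc, he⟩
    · rw [if_neg (by
        rw [Bool.or_eq_true, PySem.Set.contains_iff, PySem.Set.contains_iff]; exact hcond)]
      rw [ih]
      constructor
      · rintro (h | ⟨p, hp, hc, he⟩)
        · exact Or.inl h
        · exact Or.inr ⟨p, List.mem_cons_of_mem _ hp, hc, he⟩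
      · rintro (h | ⟨p, hp, hc, he⟩)
        · exact Or.inl h
        · rcases List.mem_cons.mp hp with rfl | hp'
          · exact absurd hc hcond
          · exact Or.inr ⟨p, hp', hc, he⟩

def iterN (E : List (String × String)) : Nat → PySem.Set String → PySem.Set String
  | 0, r => r
  | n + 1, r => iterN E n (connRound E r)

theorem foldl_const_iterN (E : List (String × String)) :
    ∀ {γ : Type} (l : List γ) (r : PySem.Set String),
    l.foldl (fun r _ => connRound E r) r = iterN E l.length r := by
  intro γ l
  induction l with
  | nil => intro r; rfl
  | cons x l ih => intro r; rw [List.foldl_cons, ih]; rfl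

theorem subset_connRound {E : List (String × String)} {r : PySem.Set String} :
    ∀ u, u ∈ r → u ∈ connRound E r := fun _ hu => mem_connRound.mpr (Or.inl hu)

theorem iterN_succ_mem {E : List (String × String)} :
    ∀ (n : Nat) (r : PySem.Set String) (u : String), u ∈ iterN E n r → u ∈ iterN E (n + 1) r := by
  intro n
  induction n with
  | zero => intro r u hu; exact subset_connRound u hu
  | succ n ih => intro r u hu; exact ih (connRound E r) u hu

theorem iterN_le_mem {E : List (String × String)} {n m : Nat} (h : n ≤ m) :
    ∀ (r : PySem.Set String) (u : String), u ∈ iterN E n r → u ∈ iterN E m r := by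
  induction m with
  | zero => intro r u hu; rwa [Nat.le_zero.mp h] at hu
  | succ m ih =>
    rcases Nat.lt_or_ge n (m + 1) with hlt | hge
    · intro r u hu
      exact iterN_succ_mem m r u (ih (by omega) r u hu)
    · intro r u hu
      have hnm : n = m + 1 := by omega
      rwa [hnm] at hu

theorem iterN_sound {E : List (String × String)} {s : String} :
    ∀ (n : Nat) (r : PySem.Set String), (∀ u ∈ r, Reach E s u) →
    ∀ u ∈ iterN E n r, Reach E s u := by
  intro n
  induction n with
  | zero => intro r h u hu; exact h u hu
  | succ n ih =>
    intro r h
    refine ih (connRound E r) ?_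
    intro u hu
    rcases mem_connRound.mp hu with h1 | ⟨p, hp, hc, he⟩
    · exact h u h1
    · have h1 : Reach E s p.1 := by
        rcases hc with hc | hc
        · exact h _ hc
        · exact (h _ hc).tail (show Adj E p.2 p.1 from Or.inr (by rcases p with ⟨a, b⟩; exact hp))
      have h2 : Reach E s p.2 := reach_snd hp h1
      rcases he with rfl | rfl
      · exact h1
      · exact h2

theorem chain_iterate {E : List (String × String)} :
    ∀ (l : List String) (a : String) (r : PySem.Set String),
    List.IsChain (Adj E) (a :: l) → a ∈ r → ∀ w, (a :: l).getLast? = some w →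
    w ∈ iterN E l.length r := by
  intro l
  induction l with
  | nil =>
    intro a r _ ha w hw
    simp at hw
    subst hw
    exact ha
  | cons c l ih =>
    intro a r hch ha w hw
    rw [List.isChain_cons_cons] at hch
    have hc : c ∈ connRound E r := by
      rcases hch.1 with hq | hq
      · exact mem_connRound.mpr (Or.inr ⟨(a, c), hq, Or.inl ha, Or.inr rfl⟩)
      · exact mem_connRound.mpr (Or.inr ⟨(c, a), hq, Or.inr ha, Or.inl rfl⟩)
    rw [List.getLast?_cons_cons] at hw
    exact ih c (connRound E r) hch.2 hc w hw

theorem chain_tail_epts {E : List (String × String)} :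
    ∀ (l : List String) (a : String), List.IsChain (Adj E) (a :: l) →
    ∀ x ∈ l, x ∈ epts E := by
  intro l
  induction l with
  | nil => intro a _ x hx; cases hx
  | cons c l ih =>
    intro a hch x hx
    rw [List.isChain_cons_cons] at hch
    rcases List.mem_cons.mp hx with rfl | hx'
    · rcases hch.1 with hq | hq
      · exact mem_epts.mpr ⟨(a, x), hq, Or.inr rfl⟩
      · exact mem_epts.mpr ⟨(x, a), hq, Or.inl rfl⟩
    · exact ih c hch.2 x hx'

-- shorten a chain to a duplicate-free one with the same ends
theorem chain_shorten {E : List (String × String)} :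
    ∀ (n : Nat) (l : List String), l.length ≤ n → List.IsChain (Adj E) l →
    ∃ l2, List.IsChain (Adj E) l2 ∧ l2.head? = l.head? ∧ l2.getLast? = l.getLast? ∧
      l2.Nodup ∧ l2 ⊆ l := by
  intro n
  induction n with
  | zero =>
    intro l hlen _
    have hnil : l = [] := List.length_eq_zero_iff.mp (Nat.le_zero.mp hlen)
    subst hnil
    exact ⟨[], by simp, rfl, rfl, List.nodup_nil, by simp⟩
  | succ n ih =>
    intro l hlen hch
    cases l with
    | nil => exact ⟨[], by simp, rfl, rfl, List.nodup_nil, by simp⟩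
    | cons a rest =>
      by_cases ha : a ∈ rest
      · obtain ⟨l₁, l₂, hsplit⟩ := List.mem_iff_append.mp ha
        have hsuf : (a :: l₂) <:+ (a :: rest) := by
          rw [hsplit]
          exact ⟨a :: l₁, by simp⟩
        have hch₂ : List.IsChain (Adj E) (a :: l₂) := hch.suffix hsuf
        have hlen₂ : (a :: l₂).length ≤ n := by
          have hr : rest.length = l₁.length + 1 + l₂.length := by rw [hsplit]; simp; omega
          simp only [List.length_cons] at hlen ⊢
          omega
        obtain ⟨l2, h1, h2, h3, h4, h5⟩ := ih (a :: l₂) hlen₂ hch₂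
        refine ⟨l2, h1, ?_, ?_, h4, ?_⟩
        · rw [h2]; rfl
        · rw [h3, hsplit]
          rw [show a :: (l₁ ++ a :: l₂) = (a :: l₁) ++ a :: l₂ by simp]
          exact (List.getLast?_append_cons (a :: l₁) a l₂).symm
        · intro x hx
          have hx2 := h5 hx
          rcases List.mem_cons.mp hx2 with rfl | hx'
          · exact List.mem_cons_self
          · rw [hsplit]
            exact List.mem_cons_of_mem _ (by simp [hx'])
      · cases rest with
        | nil => exact ⟨[a], by simp, rfl, rfl, by simp, by simp⟩
        | cons c rest' =>
          have hch' : List.IsChain (Adj E) (c :: rest') := by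
            rw [List.isChain_cons_cons] at hch
            exact hch.2
          obtain ⟨l2, h1, h2, h3, h4, h5⟩ := ih (c :: rest')
            (by simp only [List.length_cons] at hlen ⊢; omega) hch'
          have hex : ∃ l3, l2 = c :: l3 := by
            cases l2 with
            | nil => simp at h2
            | cons c' l3 =>
              have hcc : c' = c := by simpa using h2
              exact ⟨l3, congrArg (fun z => z :: l3) hcc⟩
          obtain ⟨l3, rfl⟩ := hex
          refine ⟨a :: c :: l3, ?_, rfl, ?_, ?_, ?_⟩
          · rw [List.isChain_cons_cons]
            rw [List.isChain_cons_cons] at hch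
            exact ⟨hch.1, h1⟩
          · rw [List.getLast?_cons_cons, h3, List.getLast?_cons_cons]
          · rw [List.nodup_cons]
            exact ⟨fun hc => ha (h5 hc), h4⟩
          · intro x hx
            rcases List.mem_cons.mp hx with rfl | hx'
            · exact List.mem_cons_self
            · exact List.mem_cons_of_mem _ (h5 hx')

-- completeness: a reachable vertex is found within |verts| rounds
theorem reach_in_iter {E : List (String × String)} {s v : String} (hv : Reach E s v)
    (verts : List String) (hs : s ∈ verts)
    (hin : ∀ x, x ∈ epts E → x ∈ verts) : v ∈ iterN E verts.length [s] := by
  obtain ⟨l, hch, hlast⟩ := List.exists_isChain_cons_of_relationReflTransGen hv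
  have hlast? : (s :: l).getLast? = some v := by
    rw [List.getLast?_eq_some_getLast (by simp), hlast]
  obtain ⟨l2, h1, h2, h3, h4, h5⟩ := chain_shorten (s :: l).length (s :: l) le_rfl hch
  have hex : ∃ l3, l2 = s :: l3 := by
    cases l2 with
    | nil => simp at h2
    | cons s' l3 =>
      have hss : s' = s := by simpa using h2
      exact ⟨l3, congrArg (fun z => z :: l3) hss⟩
  obtain ⟨l3, rfl⟩ := hex
  have hsub : (s :: l3) ⊆ verts := by
    intro x hx
    rcases List.mem_cons.mp hx with rfl | hx'
    · exact hs
    · exact hin x (chain_tail_epts l3 s h1 x hx')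
  have hlenle : (s :: l3).length ≤ verts.length :=
    (List.subperm_of_subset h4 hsub).length_le
  have hl3 : l3.length < verts.length := by
    simp only [List.length_cons] at hlenle; omega
  have hlast3 : (s :: l3).getLast? = some v := by rw [h3, hlast?]
  have hv3 := chain_iterate l3 s [s] h1 (by simp) v hlast3
  exact iterN_le_mem (by omega) [s] v hv3

-- the vertex-set fold of B
theorem vertsFold_pres (l : List (String × String)) :
    ∀ (acc : PySem.Set String) (x : String), x ∈ acc →
    x ∈ l.foldl (fun v p => PySem.Set.add (PySem.Set.add v p.1) p.2) acc := by
  induction l with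
  | nil => intro acc x hx; exact hx
  | cons q l ih =>
    intro acc x hx
    exact ih _ x ((PySem.Set.mem_add _ _ _).mpr (Or.inl ((PySem.Set.mem_add _ _ _).mpr (Or.inl hx))))

theorem vertsFold_epts (l : List (String × String)) :
    ∀ (acc : PySem.Set String) (x : String), x ∈ epts l →
    x ∈ l.foldl (fun v p => PySem.Set.add (PySem.Set.add v p.1) p.2) acc := by
  induction l with
  | nil => intro acc x hx; simp [epts] at hx
  | cons q l ih =>
    intro acc x hx
    rcases mem_epts.mp hx with ⟨p, hp, he⟩
    rcases List.mem_cons.mp hp with rfl | hp'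
    · rw [List.foldl_cons]
      refine vertsFold_pres l _ x ?_
      rcases he with rfl | rfl
      · exact (PySem.Set.mem_add _ _ _).mpr (Or.inl ((PySem.Set.mem_add _ _ _).mpr (Or.inr rfl)))
      · exact (PySem.Set.mem_add _ _ _).mpr (Or.inr rfl)
    · exact ih _ x (mem_epts.mpr ⟨p, hp', he⟩)

-- B's connectivity check decides Conn
theorem conn_check_iff (E : List (String × String)) (s : String) :
    (E.all (fun p =>
        ((List.range ((E.foldl (fun v p => PySem.Set.add (PySem.Set.add v p.1) p.2)
            (PySem.Set.ofList [s])).length)).foldl (fun r _ => connRound E r)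
          (PySem.Set.ofList [s])).contains p.1 &&
        ((List.range ((E.foldl (fun v p => PySem.Set.add (PySem.Set.add v p.1) p.2)
            (PySem.Set.ofList [s])).length)).foldl (fun r _ => connRound E r)
          (PySem.Set.ofList [s])).contains p.2) = true)
    ↔ Conn E s := by
  have hof : PySem.Set.ofList [s] = [s] := PySem.Set.ofList_eq_self_of_nodup _ (by simp)
  set verts := E.foldl (fun v p => PySem.Set.add (PySem.Set.add v p.1) p.2) (PySem.Set.ofList [s])
    with hverts
  have hs : s ∈ verts := vertsFold_pres E _ s (by rw [hof]; simp)
  have hin : ∀ x, x ∈ epts E → x ∈ verts := fun x hx => vertsFold_epts E _ x hx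
  have hreached : (List.range verts.length).foldl (fun r _ => connRound E r) (PySem.Set.ofList [s])
      = iterN E verts.length [s] := by
    rw [hof, foldl_const_iterN, List.length_range]
  rw [List.all_eq_true]
  constructor
  · intro hall p hp
    have hb := hall p hp
    rw [Bool.and_eq_true] at hb
    have h1 : p.1 ∈ iterN E verts.length [s] := by
      rw [← hreached]
      exact (PySem.Set.contains_iff _ _).mp hb.1
    refine iterN_sound verts.length [s] ?_ p.1 h1
    intro u hu
    have hus : u = s := by simpa using hu
    subst hus
    exact Relation.ReflTransGen.refl
  · intro hconn p hp
    have h1 : Reach E s p.1 := hconn p hp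
    have h2 : Reach E s p.2 := reach_snd hp h1
    have hm1 : p.1 ∈ iterN E verts.length [s] := reach_in_iter h1 verts hs hin
    have hm2 : p.2 ∈ iterN E verts.length [s] := reach_in_iter h2 verts hs hin
    rw [Bool.and_eq_true]
    rw [← hreached] at hm1 hm2
    exact ⟨(PySem.Set.contains_iff _ _).mpr hm1, (PySem.Set.contains_iff _ _).mpr hm2⟩

-- ---------- the two ports agree ----------

theorem try_chain_alt_char (words : List String) (s e : String)
    (hne : words ≠ []) (hok : ∀ w ∈ words, w ≠ "") :
    (try_chain_alt words s e = true) ↔ (Bal (words.map edgeT) s e ∧ Conn (words.map edgeT) s) := by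
  unfold try_chain_alt
  rw [if_neg (by simpa using hne)]
  rw [edgeListB_eq hok]
  simp only
  set E := words.map edgeT with hE
  rw [show (degAdd (degAdd (E.foldl (fun d p => degAdd (degAdd d p.1 1) p.2 (-1))
      PySem.Dict.empty) s (-1)) e 1) = degD E s e from rfl]
  by_cases hdeg : (degD E s e).values.any (fun x => x != 0) = true
  · rw [hdeg]
    simp only [if_true]
    constructor
    · intro h; cases h
    · rintro ⟨hb, _⟩
      have hfalse := (degD_check_iff E s e).mpr hb
      rw [hfalse] at hdeg
      cases hdeg
  · have hdeg' : (degD E s e).values.any (fun x => x != 0) = false := by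
      cases h : (degD E s e).values.any (fun x => x != 0)
      · rfl
      · exact absurd h hdeg
    rw [hdeg']
    simp only [Bool.false_eq_true, if_false]
    rw [conn_check_iff E s]
    have hb : Bal E s e := (degD_check_iff E s e).mp hdeg'
    constructor
    · intro hc; exact ⟨hb, hc⟩
    · rintro ⟨_, hc⟩; exact hc

-- ===== VERDICT (by name: the statement is the Claim_ definition above) =====
theorem try_chain_spec : Claim_equal_try_chain := by
  intro words s e _ hpre
  unfold Spec_try_chain
  by_cases hnil : words = []
  · subst hnil; rfl
  · have hok : ∀ w ∈ words, w ≠ "" := fun w hw hc => hpre (hc ▸ hw)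
    have hA : try_chain words s e = true ↔ Ch e words s :=
      tcAuxA_iff_ch e words.length words s rfl hnil
    have hB := try_chain_alt_char words s e hnil hok
    have hChEu := ch_iff_eu e words.length words s le_rfl hok
    have hEuler := euler_iff (words.map edgeT) s e
    rw [Bool.eq_iff_iff, hA, hB, hChEu, hEuler]
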